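-- pv_equiv track=rewrite | github.com/vihaankulkarni29/GenomeAMRAnalyzer | src/core/dependencies.py | _version_satisfies
-- ===== SOURCE A (Python) =====
-- def _version_satisfies(current_version: str, required_version: str) -> bool:
--     """Check if current version satisfies requirement."""
--     try:
--         # Simple version comparison for basic cases
--         current_parts = [int(x) for x in current_version.split('.')]
--         required_parts = [int(x) for x in required_version.split('.')]
--
--         # Pad with zeros to make same length
--         max_len = max(len(current_parts), len(required_parts))
--         current_parts.extend([0] * (max_len - len(current_parts)))
--         required_parts.extend([0] * (max_len - len(required_parts)))
--
--         return current_parts >= required_parts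
--     except Exception:
--         # If version parsing fails, assume it's satisfied
--         return True
-- ===== SOURCE B (Python) =====
-- def _parse_parts(s):
--     try:
--         return [int(x) for x in s.split('.')]
--     except Exception:
--         return None
--
--
-- def _version_satisfies(current_version: str, required_version: str) -> bool:
--     """Check if current version satisfies requirement."""
--     cur = _parse_parts(current_version)
--     req = _parse_parts(required_version)
--     if cur is None or req is None:
--         # If version parsing fails, assume it's satisfied
--         return True
--     # Pairwise early-exit comparison, missing components count as 0
--     while cur or req:
--         c = cur.pop(0) if cur else 0
--         r = req.pop(0) if req else 0
--         if c != r: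
--             return c > r
--     return True
-- ===== Notes on version B (the rewrite author's own statement) =====
-- stated objective: alternative
-- what changed: Replaces A's pad-both-lists-then-Python-list->= comparison with an early-exit pairwise loop over the two part lists (missing components treated as 0), with parsing factored into a helper returning None on failure.
import Mathlib
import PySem

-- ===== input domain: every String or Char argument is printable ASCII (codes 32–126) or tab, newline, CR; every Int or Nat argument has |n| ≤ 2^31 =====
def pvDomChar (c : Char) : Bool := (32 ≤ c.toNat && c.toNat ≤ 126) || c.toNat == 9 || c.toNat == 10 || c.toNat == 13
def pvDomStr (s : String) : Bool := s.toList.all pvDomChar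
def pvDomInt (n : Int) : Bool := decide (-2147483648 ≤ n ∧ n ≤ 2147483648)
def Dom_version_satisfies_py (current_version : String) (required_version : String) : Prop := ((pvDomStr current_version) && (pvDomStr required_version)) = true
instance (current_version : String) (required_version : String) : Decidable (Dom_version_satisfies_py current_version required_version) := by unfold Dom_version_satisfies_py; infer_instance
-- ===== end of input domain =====

-- B replaces A's pad-then-list->= comparison by an early-exit pairwise loop (missing parts = 0); objective: alternative decomposition, same cost.

-- ===== PORT A =====
-- Python list >= on int lists (lexicographic, shorter prefix is smaller)
def pvListGE : List Int → List Int → Bool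
  | _, [] => true
  | [], _ :: _ => false
  | a :: as, b :: bs => if a = b then pvListGE as bs else decide (a > b)

def version_satisfies_py (current_version : String) (required_version : String) : Bool :=
  -- try: [int(x) for x in s.split('.')]; any ValueError → except → True
  match (PySem.Chars.splitOn current_version.toList ['.']).mapM PySem.Int.ofChars?,
        (PySem.Chars.splitOn required_version.toList ['.']).mapM PySem.Int.ofChars? with
  | some current_parts, some required_parts =>
      let max_len := max current_parts.length required_parts.length
      let current_parts := current_parts ++ List.replicate (max_len - current_parts.length) 0
      let required_parts := required_parts ++ List.replicate (max_len - required_parts.length) 0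
      pvListGE current_parts required_parts
  | _, _ => true

-- ===== PORT B =====
-- _parse_parts: None on any int() failure
def pvParseParts (s : String) : Option (List Int) :=
  (PySem.Chars.splitOn s.toList ['.']).mapM PySem.Int.ofChars?

-- the while loop of B: pop fronts, missing component is 0, early exit on first difference
def pvCmpLoop : List Int → List Int → Bool
  | [], [] => true
  | c :: cs, [] => if c ≠ 0 then decide (c > 0) else pvCmpLoop cs []
  | [], r :: rs => if (0 : Int) ≠ r then decide ((0 : Int) > r) else pvCmpLoop [] rs
  | c :: cs, r :: rs => if c ≠ r then decide (c > r) else pvCmpLoop cs rs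

def version_satisfies_py_alt (current_version : String) (required_version : String) : Bool :=
  match pvParseParts current_version with
  | none => true
  | some cur =>
    match pvParseParts required_version with
    | none => true
    | some req => pvCmpLoop cur req

-- ===== PRECONDITION & SPEC =====
def Spec_version_satisfies_py (current_version : String) (required_version : String) (out : Bool) : Prop := out = version_satisfies_py_alt current_version required_version
instance (current_version : String) (required_version : String) (out : Bool) : Decidable (Spec_version_satisfies_py current_version required_version out) := by unfold Spec_version_satisfies_py; infer_instance

-- ===== CLAIM (what is proved, stated in full; the proofs are below) =====
def Claim_equal_version_satisfies_py : Prop := ∀ (current_version : String) (required_version : String), Dom_version_satisfies_py current_version required_version → Spec_version_satisfies_py current_version required_version (version_satisfies_py current_version required_version)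

-- ===== LEMMAS AND PROOFS =====

-- padded list->= equals the early-exit pairwise loop
theorem pvListGE_pad_eq (cs : List Int) (rs : List Int) :
    pvListGE (cs ++ List.replicate (max cs.length rs.length - cs.length) 0)
             (rs ++ List.replicate (max cs.length rs.length - rs.length) 0)
      = pvCmpLoop cs rs := by
  induction cs generalizing rs with
  | nil =>
    induction rs with
    | nil => simp [pvListGE, pvCmpLoop]
    | cons r rs ih =>
      simp only [List.nil_append, List.length_nil, List.length_cons, Nat.zero_max,
        Nat.sub_zero, Nat.sub_self, List.replicate_zero, List.append_nil] at *
      by_cases h : (0 : Int) = r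
      · simp [pvListGE, pvCmpLoop, List.replicate_succ, ← h, ih]
      · simp [pvListGE, pvCmpLoop, List.replicate_succ, h]
  | cons c cs ih =>
    cases rs with
    | nil =>
      have ih0 := ih []
      simp only [List.length_cons, List.length_nil, Nat.max_zero, Nat.sub_zero,
        Nat.sub_self, List.replicate_zero, List.append_nil, List.nil_append] at *
      by_cases h : c = 0
      · simp [pvListGE, pvCmpLoop, List.replicate_succ, h, ih0]
      · simp [pvListGE, pvCmpLoop, List.replicate_succ, h]
    | cons r rs =>
      have h1 : max (c :: cs).length (r :: rs).length - (c :: cs).length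
          = max cs.length rs.length - cs.length := by simp
      have h2 : max (c :: cs).length (r :: rs).length - (r :: rs).length
          = max cs.length rs.length - rs.length := by simp
      rw [h1, h2]
      by_cases h : c = r
      · simp [pvListGE, pvCmpLoop, h, ih rs]
      · simp [pvListGE, pvCmpLoop, h]

-- ===== VERDICT (by name: the statement is the Claim_ definition above) =====
theorem version_satisfies_py_spec : Claim_equal_version_satisfies_py := by
  intro cv rv _
  unfold Spec_version_satisfies_py version_satisfies_py version_satisfies_py_alt pvParseParts
  cases (PySem.Chars.splitOn cv.toList ['.']).mapM PySem.Int.ofChars? with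
  | none => rfl
  | some cs =>
    cases (PySem.Chars.splitOn rv.toList ['.']).mapM PySem.Int.ofChars? with
    | none => rfl
    | some rs => exact pvListGE_pad_eq cs rs
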